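-- pv_equiv track=rewrite | github.com/amingclawdev/aming-claw | agent/governance/state_reconcile.py | _pending_commits_through_target
-- ===== SOURCE A (Python) =====
-- from typing import Any
--
-- def _pending_commits_through_target(
--     pending: list[dict[str, Any]],
--     target_commit_sha: str,
-- ) -> list[str]:
--     commits = [
--         str(row.get("commit_sha") or "").strip()
--         for row in pending
--         if str(row.get("commit_sha") or "").strip()
--     ]
--     if target_commit_sha in commits:
--         return commits[: commits.index(target_commit_sha) + 1]
--     return commits
-- ===== SOURCE B (Python) =====
-- from typing import Any
--
-- def _pending_commits_through_target(
--     pending: list[dict[str, Any]],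
--     target_commit_sha: str,
-- ) -> list[str]:
--     result: list[str] = []
--     for row in pending:
--         sha = str(row.get("commit_sha") or "").strip()
--         if not sha:
--             continue
--         result.append(sha)
--         if sha == target_commit_sha:
--             return result
--     return result
-- ===== Notes on version B (the rewrite author's own statement) =====
-- stated objective: simpler
-- what changed: A builds the cleaned SHA list, then scans it with `in`, then scans again with `.index` and slices; B is one fused pass over pending that appends each non-empty stripped SHA and returns immediately when it equals the target.
import Mathlib
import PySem

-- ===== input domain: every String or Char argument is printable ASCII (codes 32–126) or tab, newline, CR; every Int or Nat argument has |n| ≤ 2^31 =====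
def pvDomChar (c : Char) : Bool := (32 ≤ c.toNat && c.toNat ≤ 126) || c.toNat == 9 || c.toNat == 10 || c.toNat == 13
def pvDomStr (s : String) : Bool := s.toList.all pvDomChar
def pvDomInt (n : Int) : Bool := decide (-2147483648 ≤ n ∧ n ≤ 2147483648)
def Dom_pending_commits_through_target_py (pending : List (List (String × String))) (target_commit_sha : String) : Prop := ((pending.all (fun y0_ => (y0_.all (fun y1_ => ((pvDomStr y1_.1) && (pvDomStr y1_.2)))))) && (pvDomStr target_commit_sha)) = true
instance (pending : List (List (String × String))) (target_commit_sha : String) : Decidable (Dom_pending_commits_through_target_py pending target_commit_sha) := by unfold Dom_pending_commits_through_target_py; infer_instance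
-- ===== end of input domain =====

-- B is a single fused pass with early return at the target (simpler: one scan instead of A's build + `in` + `.index` + slice).

-- ===== PORT A =====
-- row.get("commit_sha") with first-match lookup on the association list; `or ""` then str() then .strip()
def pvShaA (row : List (String × String)) : String :=
  PySem.Str.strip (((row.find? (fun p => p.1 == "commit_sha")).map (·.2)).getD "")

def pending_commits_through_target_py (pending : List (List (String × String))) (target_commit_sha : String) : List String :=
  let commits := pending.filterMap (fun row => let s := pvShaA row; if s ≠ "" then some s else none)
  if commits.contains target_commit_sha then
    match PySem.List.index? commits target_commit_sha with
    | some i => commits.take (i + 1)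
    | none => commits      -- unreachable: membership was checked
  else commits

-- ===== PORT B =====
def pvShaB (row : List (String × String)) : String :=
  PySem.Str.strip (((row.find? (fun p => p.1 == "commit_sha")).map (·.2)).getD "")

def pvAltGo (target_commit_sha : String) : List (List (String × String)) → List String
  | [] => []
  | row :: rest =>
    let sha := pvShaB row
    if sha = "" then pvAltGo target_commit_sha rest
    else if sha = target_commit_sha then [sha]
    else sha :: pvAltGo target_commit_sha rest

def pending_commits_through_target_py_alt (pending : List (List (String × String))) (target_commit_sha : String) : List String :=
  pvAltGo target_commit_sha pending

-- ===== PRECONDITION & SPEC =====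
def Spec_pending_commits_through_target_py (pending : List (List (String × String))) (target_commit_sha : String) (out : List String) : Prop := out = pending_commits_through_target_py_alt pending target_commit_sha
instance (pending : List (List (String × String))) (target_commit_sha : String) (out : List String) : Decidable (Spec_pending_commits_through_target_py pending target_commit_sha out) := by unfold Spec_pending_commits_through_target_py; infer_instance

-- ===== CLAIM (what is proved, stated in full; the proofs are below) =====
def Claim_equal_pending_commits_through_target_py : Prop := ∀ (pending : List (List (String × String))) (target_commit_sha : String), Dom_pending_commits_through_target_py pending target_commit_sha → Spec_pending_commits_through_target_py pending target_commit_sha (pending_commits_through_target_py pending target_commit_sha)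

-- ===== LEMMAS AND PROOFS =====

def pvClean (l : List (List (String × String))) : List String :=
  l.filterMap (fun row => let s := pvShaA row; if s ≠ "" then some s else none)

def pvA' (t : String) (c : List String) : List String :=
  if c.contains t then
    match PySem.List.index? c t with
    | some i => c.take (i + 1)
    | none => c
  else c

theorem pvShaB_eq (row : List (String × String)) : pvShaB row = pvShaA row := rfl

theorem pvA_eq (l : List (List (String × String))) (t : String) :
    pending_commits_through_target_py l t = pvA' t (pvClean l) := rfl

theorem pvMain (t : String) (l : List (List (String × String))) :
    pvA' t (pvClean l) = pvAltGo t l := by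
  induction l with
  | nil => simp [pvClean, pvA', pvAltGo]
  | cons row rest ih =>
    by_cases hempty : pvShaA row = ""
    · have hc : pvClean (row :: rest) = pvClean rest := by
        simp [pvClean, hempty]
      rw [hc, ih]
      simp [pvAltGo, pvShaB_eq, hempty]
    · have hc : pvClean (row :: rest) = pvShaA row :: pvClean rest := by
        simp [pvClean, hempty]
      rw [hc]
      by_cases htgt : pvShaA row = t
      · subst htgt
        have hidx : PySem.List.index? (pvShaA row :: pvClean rest) (pvShaA row) = some 0 :=
          PySem.List.index?_cons_self _ _
        unfold pvA'
        rw [hidx]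
        simp [pvAltGo, pvShaB_eq, hempty]
      · have hAlt : pvAltGo t (row :: rest) = pvShaA row :: pvAltGo t rest := by
          simp [pvAltGo, pvShaB_eq, hempty, htgt]
        rw [hAlt, ← ih]
        unfold pvA'
        rw [PySem.List.index?_cons_of_ne (pvClean rest) htgt]
        by_cases hmem : t ∈ pvClean rest
        · obtain ⟨i, hi⟩ := Option.isSome_iff_exists.mp
            ((PySem.List.index?_isSome_iff (pvClean rest) t).mpr hmem)
          have hi' : List.idxOf? t (pvClean rest) = some i := by
            simpa [PySem.List.index?_eq_idxOf?] using hi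
          simp [hmem, hi', List.take_succ_cons]
        · rw [(PySem.List.index?_eq_none_iff (pvClean rest) t).mpr hmem]
          simp [hmem]

-- ===== VERDICT (by name: the statement is the Claim_ definition above) =====
theorem pending_commits_through_target_py_spec : Claim_equal_pending_commits_through_target_py := by
  intro pending t _
  unfold Spec_pending_commits_through_target_py pending_commits_through_target_py_alt
  rw [pvA_eq, pvMain]
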